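-- pv_equiv track=rewrite | github.com/Sergiom84/July_AI | july/project_conversation.py | extract_objective
-- ===== SOURCE A (Python) =====
-- def extract_objective(file_texts: dict[str, str]) -> str:
--     readme_text = next((text for name, text in file_texts.items() if name.startswith("README")), "")
--     if not readme_text:
--         return "No se detecto un objetivo claro en README."
--
--     paragraphs = []
--     current: list[str] = []
--     for line in readme_text.splitlines():
--         stripped = line.strip()
--         if not stripped:
--             if current:
--                 paragraphs.append(" ".join(current))
--                 current = []
--             continue
--         if stripped.startswith("#"):
--             continue
--         current.append(stripped)
--     if current:
--         paragraphs.append(" ".join(current))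
--
--     for paragraph in paragraphs:
--         if len(paragraph) >= 40:
--             return paragraph[:220]
--     return paragraphs[0][:220] if paragraphs else "No se detecto un objetivo claro en README."
-- ===== SOURCE B (Python) =====
-- def extract_objective(file_texts: dict[str, str]) -> str:
--     readme_text = next((text for name, text in file_texts.items() if name.startswith("README")), "")
--     if not readme_text:
--         return "No se detecto un objetivo claro en README."
--
--     # Split the stripped line list into blank-delimited blocks by repeatedly
--     # cutting at the first blank line (index + slices), instead of running a
--     # line-by-line accumulator state machine.
--     stripped = [line.strip() for line in readme_text.splitlines()]
--     blocks = []
--     rest = stripped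
--     while "" in rest:
--         i = rest.index("")
--         blocks.append(rest[:i])
--         rest = rest[i + 1:]
--     blocks.append(rest)
--
--     paragraphs = []
--     for block in blocks:
--         body = " ".join(s for s in block if not s.startswith("#"))
--         if body:
--             paragraphs.append(body)
--
--     long_ones = [p for p in paragraphs if len(p) >= 40]
--     if long_ones:
--         return long_ones[0][:220]
--     if paragraphs:
--         return paragraphs[0][:220]
--     return "No se detecto un objetivo claro en README."
-- ===== Notes on version B (the rewrite author's own statement) =====
-- stated objective: alternative
-- what changed: A runs a line-by-line accumulator state machine (flush current words on blank lines) and then scans the paragraph list with an early-return loop; B strips all lines first, cuts the stripped list into blank-delimited blocks by repeatedly slicing at list.index('') (no per-line state), builds each paragraph from its whole block at once, and selects via a filtered list of long paragraphs instead of a scan loop.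
import Mathlib
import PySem

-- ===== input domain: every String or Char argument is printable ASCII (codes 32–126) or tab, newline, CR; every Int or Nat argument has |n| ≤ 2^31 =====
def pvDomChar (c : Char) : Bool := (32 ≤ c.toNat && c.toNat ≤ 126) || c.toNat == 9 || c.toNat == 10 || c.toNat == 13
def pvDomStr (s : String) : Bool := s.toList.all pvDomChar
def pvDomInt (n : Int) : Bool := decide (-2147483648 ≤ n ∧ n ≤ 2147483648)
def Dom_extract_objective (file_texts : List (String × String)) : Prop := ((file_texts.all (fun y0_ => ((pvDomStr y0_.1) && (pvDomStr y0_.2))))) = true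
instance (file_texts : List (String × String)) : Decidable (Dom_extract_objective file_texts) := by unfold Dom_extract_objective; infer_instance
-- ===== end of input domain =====

-- B replaces A's line-by-line accumulator state machine by a different decomposition:
-- it cuts the stripped line list into blank-delimited blocks by repeated index/slice
-- splitting, builds each paragraph from its whole block, and selects by filtering;
-- same return value as A everywhere (alternative decomposition, no speed claim).

-- shared first line of both Pythons: dict(file_texts).items() — the Python parameter is a
-- dict, so duplicate keys in the association list overwrite in place.
def pvItems (file_texts : List (String × String)) : List (String × String) :=
  (file_texts.foldl (fun d p => d.insert p.1 p.2)
    (PySem.Dict.empty : PySem.Dict String String)).items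

-- next((text for name, text in items if name.startswith("README")), "")
def pvFindReadme : List (String × String) → String
  | [] => ""
  | (name, text) :: rest =>
      if PySem.Str.startswith name "README" then text else pvFindReadme rest

-- ===== PORT A =====
-- loop body: blank line flushes `current` into `paragraphs`, '#' lines are skipped
def pvAStep (st : List String × List String) (line : String) : List String × List String :=
  let stripped := PySem.Str.strip line
  if stripped = "" then
    (if st.2 ≠ [] then (st.1 ++ [PySem.Str.join " " st.2], ([] : List String)) else st)
  else if PySem.Str.startswith stripped "#" then st
  else (st.1, st.2 ++ [stripped])

-- for paragraph in paragraphs: if len(paragraph) >= 40: return paragraph[:220]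
def pvAScan : List String → Option String
  | [] => none
  | p :: rest =>
      if 40 ≤ PySem.Str.len p then some (PySem.Str.slice p none (some 220)) else pvAScan rest

def extract_objective (file_texts : List (String × String)) : String :=
  let readme_text := pvFindReadme (pvItems file_texts)
  if readme_text = "" then "No se detecto un objetivo claro en README."
  else
    let st := (PySem.Str.splitlines readme_text).foldl pvAStep ([], [])
    let paragraphs := if st.2 ≠ [] then st.1 ++ [PySem.Str.join " " st.2] else st.1
    match pvAScan paragraphs with
    | some r => r
    | none =>
        match paragraphs with
        | [] => "No se detecto un objetivo claro en README."
        | p :: _ => PySem.Str.slice p none (some 220)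

-- ===== PORT B =====
-- the while loop of Source B: repeatedly cut off the prefix before the first blank line
-- (list.index + two slices); the `none` branch is unreachable (guarded by `"" in rest`).
def pvSplitGo (rest : List String) (blocks : List (List String)) : List (List String) :=
  if _hm : "" ∈ rest then
    match _h : PySem.List.index? rest "" with
    | some i =>
        pvSplitGo (PySem.List.slice rest (some ((i : Int) + 1)) none)
                  (blocks ++ [PySem.List.slice rest none (some (i : Int))])
    | none => blocks
  else blocks ++ [rest]
termination_by rest.length
decreasing_by
  obtain ⟨hk, -, -⟩ := PySem.List.getElem_of_index?_eq_some _h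
  have hs : PySem.List.slice rest (some ((i : Int) + 1)) none = rest.drop (i + 1) := by
    have := PySem.List.slice_from_natCast rest (i + 1)
    push_cast at this
    exact this
  rw [hs]
  simp only [List.length_drop]
  omega

def extract_objective_alt (file_texts : List (String × String)) : String :=
  let readme_text := pvFindReadme (pvItems file_texts)
  if readme_text = "" then "No se detecto un objetivo claro en README."
  else
    let stripped := (PySem.Str.splitlines readme_text).map PySem.Str.strip
    let blocks := pvSplitGo stripped []
    let paragraphs := blocks.foldl (fun ps block =>
      let body := PySem.Str.join " " (block.filter (fun s => !PySem.Str.startswith s "#"))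
      if body ≠ "" then ps ++ [body] else ps) []
    match paragraphs.filter (fun p => decide (40 ≤ PySem.Str.len p)) with
    | l :: _ => PySem.Str.slice l none (some 220)
    | [] =>
        match paragraphs with
        | p :: _ => PySem.Str.slice p none (some 220)
        | [] => "No se detecto un objetivo claro en README."

-- ===== PRECONDITION & SPEC =====
def Spec_extract_objective (file_texts : List (String × String)) (out : String) : Prop := out = extract_objective_alt file_texts
instance (file_texts : List (String × String)) (out : String) : Decidable (Spec_extract_objective file_texts out) := by unfold Spec_extract_objective; infer_instance

-- ===== CLAIM (what is proved, stated in full; the proofs are below) =====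
def Claim_equal_extract_objective : Prop := ∀ (file_texts : List (String × String)), Dom_extract_objective file_texts → Spec_extract_objective file_texts (extract_objective file_texts)

-- ===== LEMMAS AND PROOFS =====

-- the paragraphs still to be produced from `lines`, starting with `words` accumulated
def pvParas : List String → List String → List String
  | [], _ => []
  | line :: rest, words =>
      let s := PySem.Str.strip line
      if s = "" then
        (if words ≠ [] then PySem.Str.join " " words :: pvParas rest [] else pvParas rest words)
      else if PySem.Str.startswith s "#" then pvParas rest words
      else pvParas rest (words ++ [s])

theorem pvAFold_eq_paras (lines : List String) :
    ∀ (ps cur : List String),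
      (let st := lines.foldl pvAStep (ps, cur);
       if st.2 ≠ [] then st.1 ++ [PySem.Str.join " " st.2] else st.1)
      = ps ++ pvParas (lines ++ [""]) cur := by
  induction lines with
  | nil =>
    intro ps cur
    have hstrip : PySem.Str.strip "" = "" := by decide
    by_cases hw : cur = [] <;>
      simp [pvParas, hw, hstrip, -PySem.Str.len_eq, -PySem.Str.startswith_eq,
        -PySem.Str.toList_strip]
  | cons line rest ih =>
    intro ps cur
    by_cases hs : PySem.Str.strip line = ""
    · by_cases hw : cur = []
      · simp [pvAStep, pvParas, hs, hw, ih, -PySem.Str.len_eq, -PySem.Str.startswith_eq,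
          -PySem.Str.toList_strip]
      · simp only [List.cons_append, pvParas, List.foldl_cons, pvAStep, hs, hw, ne_eq,
          if_true, not_false_eq_true]
        simp only [ih]
        simp
    · by_cases hh : PySem.Str.startswith (PySem.Str.strip line) "#" = true
      · simp [pvAStep, pvParas, hs, hh, ih, -PySem.Str.len_eq, -PySem.Str.startswith_eq,
          -PySem.Str.toList_strip]
      · simp [pvAStep, pvParas, hs, hh, ih, -PySem.Str.len_eq, -PySem.Str.startswith_eq,
          -PySem.Str.toList_strip]

-- reference form of the splitting loop: (head block, remaining blocks)
def pvBref : List String → List String × List (List String)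
  | [] => ([], [])
  | s :: r =>
      let p := pvBref r
      if s = "" then ([], p.1 :: p.2) else (s :: p.1, p.2)

theorem pvBref_no_blank (ls : List String) (h : "" ∉ ls) : pvBref ls = (ls, []) := by
  induction ls with
  | nil => rfl
  | cons s r ih =>
    simp only [List.mem_cons, not_or] at h
    simp [pvBref, ih h.2, Ne.symm h.1]

theorem pvBref_split (pre suf : List String) (h : "" ∉ pre) :
    pvBref (pre ++ "" :: suf) = ([] ++ pre, (pvBref suf).1 :: (pvBref suf).2) := by
  induction pre with
  | nil => simp [pvBref]
  | cons s r ih =>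
    simp only [List.mem_cons, not_or] at h
    simp [pvBref, ih h.2, Ne.symm h.1]

theorem pvSplitGo_eq_bref (n : Nat) : ∀ (rest : List String), rest.length ≤ n →
    ∀ (acc : List (List String)),
      pvSplitGo rest acc = acc ++ (pvBref rest).1 :: (pvBref rest).2 := by
  induction n with
  | zero =>
    intro rest hlen acc
    have : rest = [] := by cases rest <;> simp_all
    subst this
    simp [pvSplitGo, pvBref]
  | succ n ih =>
    intro rest hlen acc
    by_cases hm : "" ∈ rest
    · obtain ⟨i, hi⟩ := (PySem.List.index?_isSome_iff rest "").2 hm |> Option.isSome_iff_exists.1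
      obtain ⟨pre, suf, hsplit, hprelen, hnpre⟩ := (PySem.List.index?_eq_some_iff rest "" i).1 hi
      have hfrom : PySem.List.slice rest (some ((i : Int) + 1)) none = rest.drop (i + 1) := by
        have := PySem.List.slice_from_natCast rest (i + 1); push_cast at this; exact this
      have hto : PySem.List.slice rest none (some (i : Int)) = rest.take i :=
        PySem.List.slice_to_natCast rest i
      have hdrop : rest.drop (i + 1) = suf := by
        subst hsplit; rw [← hprelen]
        simp
      have htake : rest.take i = pre := by
        subst hsplit; rw [← hprelen]
        simp
      rw [pvSplitGo, dif_pos hm]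
      split
      · rename_i i' hi'
        have hii : i' = i := by rw [hi] at hi'; exact (Option.some_inj.1 hi').symm
        subst hii
        rw [hfrom, hto, hdrop, htake]
        rw [ih suf (by subst hsplit; simp at hlen; omega) (acc ++ [pre])]
        rw [hsplit, pvBref_split pre suf hnpre]
        simp
      · rename_i hnone
        rw [hi] at hnone; exact absurd hnone (by simp)
    · rw [pvSplitGo, dif_neg hm, pvBref_no_blank rest hm]

-- emit one block as a paragraph (drop '#' lines, join, keep only non-empty)
def pvEmit (b : List String) : Option String :=
  let q := PySem.Str.join " " (b.filter (fun s => !PySem.Str.startswith s "#"))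
  if q = "" then none else some q

theorem pvJoin_ne_empty (w : List String) (hw : ∀ x ∈ w, x ≠ "") (hne : w ≠ []) :
    PySem.Str.join " " w ≠ "" := by
  intro hcontra
  have h0 : (PySem.Str.join " " w).toList = [] := by rw [hcontra]; rfl
  rw [PySem.Str.toList_join] at h0
  match w, hne with
  | [x], _ =>
    simp only [List.map, PySem.Chars.join_singleton] at h0
    exact hw x (by simp) (by cases x; simp_all)
  | x :: y :: t, _ =>
    simp only [List.map, PySem.Chars.join_cons_cons] at h0
    simp at h0

theorem pvJoinNil : PySem.Str.join " " ([] : List String) = "" := by decide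

theorem pvFoldl_paras (blocks : List (List String)) :
    ∀ (init : List String),
      blocks.foldl (fun ps block =>
        if PySem.Str.join " " (block.filter (fun s => !PySem.Str.startswith s "#")) ≠ "" then
          ps ++ [PySem.Str.join " " (block.filter (fun s => !PySem.Str.startswith s "#"))]
        else ps) init
      = init ++ blocks.filterMap pvEmit := by
  induction blocks with
  | nil => simp
  | cons b bs ih =>
    intro init
    simp only [List.foldl_cons, List.filterMap_cons, ih]
    unfold pvEmit
    by_cases hq : PySem.Str.join " " (b.filter (fun s => !PySem.Str.startswith s "#")) = "" <;>
      simp [hq, -PySem.Str.startswith_eq]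

-- A's grouping state machine equals the block pipeline (w = words accumulated so far)
theorem pvParas_eq_pipe (lines : List String) :
    ∀ (w : List String), (∀ x ∈ w, x ≠ "" ∧ PySem.Str.startswith x "#" = false) →
      pvParas (lines ++ [""]) w =
        (pvEmit (w ++ (pvBref (lines.map PySem.Str.strip)).1)).toList
          ++ (pvBref (lines.map PySem.Str.strip)).2.filterMap pvEmit := by
  induction lines with
  | nil =>
    intro w hwinv
    have hstrip : PySem.Str.strip "" = "" := by decide
    have hfilt : w.filter (fun s => !PySem.Str.startswith s "#") = w :=
      List.filter_eq_self.2 (fun x hx => by simpa using (hwinv x hx).2)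
    simp only [List.nil_append, pvParas, hstrip, List.map, pvBref,
      List.append_nil, List.filterMap_nil]
    unfold pvEmit
    by_cases hw : w = []
    · subst hw; simp [pvJoinNil]
    · rw [hfilt, if_neg (pvJoin_ne_empty w (fun x hx => (hwinv x hx).1) hw)]
      simp [hw]
  | cons line rest ih =>
    intro w hwinv
    by_cases hs : PySem.Str.strip line = ""
    · have hfilt : w.filter (fun s => !PySem.Str.startswith s "#") = w :=
        List.filter_eq_self.2 (fun x hx => by simpa using (hwinv x hx).2)
      simp only [List.cons_append, pvParas, hs, List.map, pvBref]
      by_cases hw : w = []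
      · subst hw
        simp only [ne_eq, not_true_eq_false, reduceIte]
        rw [ih [] (by simp)]
        simp only [List.filterMap_cons, List.nil_append, List.append_nil]
        have he : pvEmit ([] : List String) = none := by decide
        rw [he]
        cases hemit : pvEmit ((pvBref (rest.map PySem.Str.strip)).1) <;> simp
      · simp only [ne_eq, hw, not_false_eq_true, reduceIte]
        rw [ih [] (by simp)]
        simp only [List.filterMap_cons, List.nil_append, List.append_nil]
        have h2 : pvEmit (w ++ []) = some (PySem.Str.join " " w) := by
          rw [List.append_nil]
          unfold pvEmit
          rw [hfilt, if_neg (pvJoin_ne_empty w (fun x hx => (hwinv x hx).1) hw)]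
        rw [List.append_nil] at h2
        rw [h2]
        cases hemit : pvEmit ((pvBref (rest.map PySem.Str.strip)).1) <;> simp
    · by_cases hh : PySem.Str.startswith (PySem.Str.strip line) "#" = true
      · simp only [List.cons_append, pvParas, hh, reduceIte,
          List.map, pvBref, hs]
        rw [ih w hwinv]
        congr 2
        unfold pvEmit
        have : (PySem.Str.strip line :: (pvBref (rest.map PySem.Str.strip)).1).filter
            (fun s => !PySem.Str.startswith s "#")
            = ((pvBref (rest.map PySem.Str.strip)).1).filter
                (fun s => !PySem.Str.startswith s "#") := by
          rw [List.filter_cons_of_neg]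
          simpa using hh
        simp only [List.filter_append, this]
      · simp only [List.cons_append, pvParas, hh, Bool.false_eq_true,
          List.map, pvBref, hs]
        rw [ih (w ++ [PySem.Str.strip line])
          (by intro x hx
              rcases List.mem_append.1 hx with h | h
              · exact hwinv x h
              · simp only [List.mem_singleton] at h; subst h
                exact ⟨hs, by simpa using hh⟩)]
        simp

-- selection: A's scan loop returns the head of the length-≥-40 filter
theorem pvAScan_eq_filter_head (P : List String) :
    pvAScan P = (P.filter (fun p => decide (40 ≤ PySem.Str.len p))).head?.map
      (fun p => PySem.Str.slice p none (some 220)) := by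
  induction P with
  | nil => simp [pvAScan]
  | cons p rest ih =>
    by_cases h : 40 ≤ PySem.Str.len p
    · simp [pvAScan, h, -PySem.Str.len_eq]
    · simp [pvAScan, h, ih, -PySem.Str.len_eq]

-- ===== VERDICT (by name: the statement is the Claim_ definition above) =====
theorem extract_objective_spec : Claim_equal_extract_objective := by
  intro file_texts _
  unfold Spec_extract_objective extract_objective extract_objective_alt
  by_cases hr : pvFindReadme (pvItems file_texts) = ""
  · simp [hr]
  · simp only [hr, if_false]
    set lines := PySem.Str.splitlines (pvFindReadme (pvItems file_texts)) with hlines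
    -- the two paragraph lists coincide
    have hA := pvAFold_eq_paras lines [] []
    simp only [List.nil_append] at hA
    have hB := pvSplitGo_eq_bref (lines.map PySem.Str.strip).length (lines.map PySem.Str.strip)
      (le_refl _) []
    simp only [List.nil_append] at hB
    rw [pvParas_eq_pipe lines [] (by simp)] at hA
    simp only [List.nil_append] at hA
    have hPcons : List.filterMap pvEmit
        ((pvBref (lines.map PySem.Str.strip)).1 :: (pvBref (lines.map PySem.Str.strip)).2)
        = (pvEmit ((pvBref (lines.map PySem.Str.strip)).1)).toList
          ++ List.filterMap pvEmit (pvBref (lines.map PySem.Str.strip)).2 := by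
      cases hemit : pvEmit ((pvBref (lines.map PySem.Str.strip)).1) <;>
        simp [hemit]
    rw [hA, hB, pvFoldl_paras, List.nil_append, hPcons]
    -- identical selection on the identical paragraph list
    set P := (pvEmit ((pvBref (lines.map PySem.Str.strip)).1)).toList
      ++ (pvBref (lines.map PySem.Str.strip)).2.filterMap pvEmit with hP
    rw [pvAScan_eq_filter_head]
    cases hc : P.filter (fun p => decide (40 ≤ PySem.Str.len p)) with
    | cons l t => simp
    | nil =>
      simp only [List.head?_nil, Option.map_none]
      cases P <;> simp
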